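-- pv_equiv track=rewrite | github.com/martin102179/GlossaryChecker | Glossary_Check.py | parse_Loctool
-- ===== SOURCE A (Python) =====
-- def parse_Loctool(TempList):
--     for i in range(len(TempList)):
--         switch = 1
--         line = ''
--         tempstring = TempList[i]
--         while len(tempstring) > 0:
--             if tempstring[0] == '>':
--                 switch = 1
--                 tempstring = tempstring[1:]
--             elif tempstring[0] == '<':
--                 switch = 0
--                 tempstring = tempstring[1:]
--             elif switch == 0:
--                 tempstring = tempstring[1:]
--             elif switch == 1:
--                 if tempstring[0] == '\n' or tempstring[0] == '\t':
--                     tempstring = tempstring[1:]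
--                 else:
--                     line += tempstring[0]
--                     tempstring = tempstring[1:]
--         TempList[i] = line
--     return TempList
-- ===== SOURCE B (Python) =====
-- def parse_Loctool(TempList):
--     for i in range(len(TempList)):
--         parts = TempList[i].split('<')
--         kept = parts[0] + ''.join(p.split('>', 1)[1] if '>' in p else '' for p in parts[1:])
--         TempList[i] = ''.join(c for c in kept if c not in '>\n\t')
--     return TempList
-- ===== Notes on version B (the rewrite author's own statement) =====
-- stated objective: simpler
-- what changed: Replaced the char-by-char switch automaton over repeated string slices with split-on-'<', drop-through-first-'>' per piece, and one filter pass removing '>', newline and tab.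
import Mathlib
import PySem

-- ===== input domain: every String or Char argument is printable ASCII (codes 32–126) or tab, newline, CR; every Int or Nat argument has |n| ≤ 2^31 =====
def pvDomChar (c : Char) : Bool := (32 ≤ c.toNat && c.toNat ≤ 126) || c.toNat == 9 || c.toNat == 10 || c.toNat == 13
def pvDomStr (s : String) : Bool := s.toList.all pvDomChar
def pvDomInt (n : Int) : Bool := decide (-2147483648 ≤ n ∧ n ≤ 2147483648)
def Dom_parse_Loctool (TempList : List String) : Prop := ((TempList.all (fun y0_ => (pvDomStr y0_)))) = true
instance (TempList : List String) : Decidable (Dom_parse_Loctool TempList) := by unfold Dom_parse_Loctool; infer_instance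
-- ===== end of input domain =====

-- B replaces A's char-by-char switch automaton over repeated string slices by split-on-'<' /
-- drop-through-'>' plus one filter pass (simpler); equivalence is about the returned list (A and
-- B both mutate the argument list in place in Python; the Lean ports model the returned value).

-- ===== PORT A =====
-- the while-loop: switch ∈ {0,1} as in Python; tempstring shrinks by one each step.
-- (Python has no final 'else'; switch is always 0 or 1 so the last branch is exhaustive.)
def pvAGo (switch : Int) (line : List Char) (s : List Char) : List Char :=
  match s with
  | [] => line
  | c :: t =>
    if c = '>' then pvAGo 1 line t
    else if c = '<' then pvAGo 0 line t
    else if switch = 0 then pvAGo 0 line t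
    else if c = '\n' ∨ c = '\t' then pvAGo 1 line t
    else pvAGo 1 (line ++ [c]) t

def parse_Loctool (TempList : List String) : List String :=
  TempList.map (fun s => String.mk (pvAGo 1 [] s.toList))

-- ===== PORT B =====
-- hand port of str.split('<') (single-char separator)
def pvSplitLt : List Char → List (List Char)
  | [] => [[]]
  | c :: t =>
    if c = '<' then [] :: pvSplitLt t
    else
      match pvSplitLt t with
      | [] => [[c]]          -- unreachable: pvSplitLt never returns []
      | h :: r => (c :: h) :: r

-- hand port of "p.split('>', 1)[1] if '>' in p else ''"
def pvAfterGt (p : List Char) : List Char :=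
  if '>' ∈ p then (p.dropWhile (· ≠ '>')).drop 1 else []

-- "c not in '>\n\t'"
def pvKeep (c : Char) : Bool := !(c == '>' || c == '\n' || c == '\t')

def pvBOne (s : List Char) : List Char :=
  (match pvSplitLt s with
   | [] => []                 -- unreachable
   | h :: r => h ++ (r.map pvAfterGt).flatten).filter pvKeep

def parse_Loctool_alt (TempList : List String) : List String :=
  TempList.map (fun s => String.mk (pvBOne s.toList))

-- ===== PRECONDITION & SPEC =====
def Spec_parse_Loctool (TempList : List String) (out : List String) : Prop := out = parse_Loctool_alt TempList
instance (TempList : List String) (out : List String) : Decidable (Spec_parse_Loctool TempList out) := by unfold Spec_parse_Loctool; infer_instance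

-- ===== CLAIM (what is proved, stated in full; the proofs are below) =====
def Claim_equal_parse_Loctool : Prop := ∀ (TempList : List String), Dom_parse_Loctool TempList → Spec_parse_Loctool TempList (parse_Loctool TempList)

-- ===== LEMMAS AND PROOFS =====

lemma pvSplitLt_ne_nil (s : List Char) : pvSplitLt s ≠ [] := by
  cases s with
  | nil => simp [pvSplitLt]
  | cons c t =>
    simp only [pvSplitLt]
    split
    · simp
    · cases h : pvSplitLt t <;> simp

-- kept text for state 1 / state 0
def pvKeptT (s : List Char) : List Char :=
  match pvSplitLt s with
  | [] => []
  | h :: r => h ++ (r.map pvAfterGt).flatten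

def pvKeptF (s : List Char) : List Char :=
  match pvSplitLt s with
  | [] => []
  | h :: r => pvAfterGt h ++ (r.map pvAfterGt).flatten

lemma pvAfterGt_gt (h : List Char) : pvAfterGt ('>' :: h) = h := by
  simp [pvAfterGt, List.dropWhile]

lemma pvAfterGt_cons (c : Char) (h : List Char) (hc : c ≠ '>') :
    pvAfterGt (c :: h) = pvAfterGt h := by
  have : ¬ ('>' = c) := fun h => hc h.symm
  simp [pvAfterGt, List.dropWhile, hc, this, List.mem_cons]

lemma pvKeptT_lt (t : List Char) : pvKeptT ('<' :: t) = pvKeptF t := by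
  unfold pvKeptT pvKeptF
  simp only [pvSplitLt]
  cases h : pvSplitLt t with
  | nil => exact absurd h (pvSplitLt_ne_nil t)
  | cons a r => simp

lemma pvKeptF_lt (t : List Char) : pvKeptF ('<' :: t) = pvKeptF t := by
  unfold pvKeptF
  simp only [pvSplitLt]
  cases h : pvSplitLt t with
  | nil => exact absurd h (pvSplitLt_ne_nil t)
  | cons a r => simp [pvAfterGt]

lemma pvKeptT_cons (c : Char) (t : List Char) (hc : c ≠ '<') :
    pvKeptT (c :: t) = c :: pvKeptT t := by
  unfold pvKeptT
  simp only [pvSplitLt, if_neg hc]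
  cases h : pvSplitLt t with
  | nil => exact absurd h (pvSplitLt_ne_nil t)
  | cons a r => simp

lemma pvKeptF_cons (c : Char) (t : List Char) (hlt : c ≠ '<') (hgt : c ≠ '>') :
    pvKeptF (c :: t) = pvKeptF t := by
  unfold pvKeptF
  simp only [pvSplitLt, if_neg hlt]
  cases h : pvSplitLt t with
  | nil => exact absurd h (pvSplitLt_ne_nil t)
  | cons a r => simp [pvAfterGt_cons c a hgt]

lemma pvKeptF_gt (t : List Char) : pvKeptF ('>' :: t) = pvKeptT t := by
  unfold pvKeptF pvKeptT
  have hlt : ('>' : Char) ≠ '<' := by decide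
  simp only [pvSplitLt, if_neg hlt]
  cases h : pvSplitLt t with
  | nil => exact absurd h (pvSplitLt_ne_nil t)
  | cons a r => simp [pvAfterGt_gt]

-- the central mutual invariant, in one induction
lemma pvMain (s : List Char) :
    (∀ line, pvAGo 1 line s = line ++ (pvKeptT s).filter pvKeep) ∧
    (∀ line, pvAGo 0 line s = line ++ (pvKeptF s).filter pvKeep) := by
  induction s with
  | nil =>
    constructor <;> intro line <;> simp [pvAGo, pvKeptT, pvKeptF, pvSplitLt, pvAfterGt]
  | cons c t ih =>
    obtain ⟨ih1, ih0⟩ := ih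
    by_cases hgt : c = '>'
    · subst hgt
      constructor <;> intro line
      · rw [show pvKeptT ('>' :: t) = '>' :: pvKeptT t from pvKeptT_cons _ _ (by decide)]
        simp [pvAGo, ih1, pvKeep, List.filter]
      · rw [pvKeptF_gt]
        simp [pvAGo, ih1]
    · by_cases hlt : c = '<'
      · subst hlt
        constructor <;> intro line
        · rw [pvKeptT_lt]
          simp [pvAGo, ih0]
        · rw [pvKeptF_lt]
          simp [pvAGo, ih0]
      · constructor <;> intro line
        · rw [pvKeptT_cons c t hlt]
          by_cases hws : c = '\n' ∨ c = '\t'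
          · have : pvKeep c = false := by
              rcases hws with h | h <;> subst h <;> decide
            simp [pvAGo, hgt, hlt, hws, ih1, List.filter, this]
          · have : pvKeep c = true := by
              simp only [pvKeep, Bool.not_eq_true', Bool.or_eq_false_iff, beq_eq_false_iff_ne, ne_eq]
              exact ⟨⟨hgt, fun h => hws (Or.inl h)⟩, fun h => hws (Or.inr h)⟩
            simp [pvAGo, hgt, hlt, hws, ih1, List.filter, this]
        · rw [pvKeptF_cons c t hlt hgt]
          simp [pvAGo, hgt, hlt, ih0]

lemma pvBOne_eq (s : List Char) : pvAGo 1 [] s = pvBOne s := by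
  have h := (pvMain s).1 []
  simp only [List.nil_append] at h
  rw [h]
  unfold pvBOne pvKeptT
  cases hs : pvSplitLt s with
  | nil => rfl
  | cons a r => rfl

-- ===== VERDICT (by name: the statement is the Claim_ definition above) =====
theorem parse_Loctool_spec : Claim_equal_parse_Loctool := by
  intro l _
  unfold Spec_parse_Loctool parse_Loctool parse_Loctool_alt
  exact List.map_congr_left fun s _ => congrArg String.mk (pvBOne_eq s.toList)
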